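-- pv_equiv track=rewrite | github.com/Hyobi-Lim/BAEKJOON_Programmers | 프로그래머스/2/12899. 124 나라의 숫자/124 나라의 숫자.py | solution
-- ===== SOURCE A (Python) =====
-- def solution(n):
--     answer = ''
--     all=[]
--     while(n>0):
--         if n%3==0:
--             all.append('4')
--             n//=3
--             n-=1
--         elif n%3==2:
--             all.append('2')
--             n//=3
--         elif n%3==1:
--             all.append('1')
--             n//=3
--     for i in range(len(all)-1,-1,-1):
--         answer+=all[i]
--     return answer
-- ===== SOURCE B (Python) =====
-- def solution(n):
--     if n <= 0:
--         return ''
--     q, r = divmod(n, 3)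
--     if r == 0:
--         return solution(q - 1) + '4'
--     if r == 1:
--         return solution(q) + '1'
--     return solution(q) + '2'
-- ===== Notes on version B (the rewrite author's own statement) =====
-- stated objective: simpler
-- what changed: Replaced the iterative digit-collecting loop plus explicit reversing loop with a direct recursion on divmod(n,3) that builds the string most-significant-first, eliminating the accumulator list and the reversal pass.
import Mathlib
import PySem

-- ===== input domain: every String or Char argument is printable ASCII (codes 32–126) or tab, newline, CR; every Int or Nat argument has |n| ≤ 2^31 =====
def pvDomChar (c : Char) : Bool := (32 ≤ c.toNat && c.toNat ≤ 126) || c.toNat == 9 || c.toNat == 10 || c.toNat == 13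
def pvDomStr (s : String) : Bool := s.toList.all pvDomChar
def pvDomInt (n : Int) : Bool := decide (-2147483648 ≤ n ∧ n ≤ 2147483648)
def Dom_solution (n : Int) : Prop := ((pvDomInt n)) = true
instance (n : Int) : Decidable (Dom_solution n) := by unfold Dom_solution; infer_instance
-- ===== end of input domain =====

-- B replaces A's collect-then-reverse loops by a direct divmod recursion building the string most-significant-first (simpler).

-- ===== PORT A =====
-- the while loop: collects digits least-significant-first into `all`
def solutionLoop (n : Int) (all : List Char) : List Char :=
  if 0 < n then
    if PySem.Int.mod n 3 = 0 then
      solutionLoop (PySem.Int.floordiv n 3 - 1) (all ++ ['4'])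
    else if PySem.Int.mod n 3 = 2 then
      solutionLoop (PySem.Int.floordiv n 3) (all ++ ['2'])
    else if PySem.Int.mod n 3 = 1 then
      solutionLoop (PySem.Int.floordiv n 3) (all ++ ['1'])
    else all   -- unreachable: n % 3 ∈ {0,1,2}
  else all
termination_by n.toNat
decreasing_by
  all_goals
    rw [PySem.Int.floordiv_eq_ediv_of_pos (by norm_num : (0:Int) < 3)]
    omega

def solution (n : Int) : String :=
  let all := solutionLoop n []
  -- for i in range(len(all)-1, -1, -1): answer += all[i]  (index always in range, so pyGetD is exact)
  (PySem.List.pyRange ((all.length : Int) - 1) (-1) (-1)).foldl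
    (fun answer i => answer ++ String.ofList [PySem.List.pyGetD all i ' ']) ""

-- ===== PORT B =====
def solution_alt (n : Int) : String :=
  if n ≤ 0 then ""
  else
    let q := PySem.Int.floordiv n 3
    let r := PySem.Int.mod n 3
    if r = 0 then solution_alt (q - 1) ++ "4"
    else if r = 1 then solution_alt q ++ "1"
    else solution_alt q ++ "2"
termination_by n.toNat
decreasing_by
  all_goals
    rw [PySem.Int.floordiv_eq_ediv_of_pos (by norm_num : (0:Int) < 3)]
    omega

-- ===== PRECONDITION & SPEC =====
def Spec_solution (n : Int) (out : String) : Prop := out = solution_alt n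
instance (n : Int) (out : String) : Decidable (Spec_solution n out) := by unfold Spec_solution; infer_instance

-- ===== CLAIM (what is proved, stated in full; the proofs are below) =====
def Claim_equal_solution : Prop := ∀ (n : Int), Dom_solution n → Spec_solution n (solution n)

-- ===== LEMMAS AND PROOFS =====

-- A's while loop produces exactly B's string, reversed, appended to the accumulator
lemma loop_eq (m : Nat) : ∀ (n : Int), n.toNat = m → ∀ (all : List Char),
    solutionLoop n all = all ++ (solution_alt n).toList.reverse := by
  induction m using Nat.strong_induction_on with
  | _ m ih =>
    intro n hm all
    rw [solutionLoop, solution_alt]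
    by_cases hn : 0 < n
    · have h3 : PySem.Int.mod n 3 = n % 3 := PySem.Int.mod_eq_emod_of_pos (by norm_num)
      have hq : PySem.Int.floordiv n 3 = n / 3 := PySem.Int.floordiv_eq_ediv_of_pos (by norm_num)
      have hr : n % 3 = 0 ∨ n % 3 = 1 ∨ n % 3 = 2 := by omega
      simp only [hn, if_pos, if_neg (by omega : ¬ n ≤ 0), h3, hq]
      rcases hr with h | h | h
      · simp only [h]
        rw [ih (n / 3 - 1).toNat (by omega) (n / 3 - 1) rfl (all ++ ['4'])]
        simp
      · rw [h]
        rw [if_neg (by norm_num), if_neg (by norm_num), if_pos rfl, if_pos rfl]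
        rw [ih (n / 3).toNat (by omega) (n / 3) rfl (all ++ ['1'])]
        simp
      · rw [h]
        rw [if_neg (by norm_num), if_pos rfl, if_neg (by norm_num)]
        rw [ih (n / 3).toNat (by omega) (n / 3) rfl (all ++ ['2'])]
        simp
    · simp [hn, (by omega : n ≤ 0)]

-- the reversing for-loop: folding over range(len-1, -1, -1) appends the reverse of the list
lemma revfold (l : List Char) : ∀ (s : String),
    (PySem.List.pyRange ((l.length : Int) - 1) (-1) (-1)).foldl
      (fun answer i => answer ++ String.ofList [PySem.List.pyGetD l i ' ']) s
    = s ++ String.ofList l.reverse := by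
  induction l using List.reverseRecOn with
  | nil => intro s; simp [PySem.List.pyRange_neg_one_eq_nil]
  | append_singleton ys c ihy =>
    intro s
    have hlen : ((ys ++ [c]).length : Int) - 1 = (ys.length : Int) := by simp
    rw [hlen, PySem.List.pyRange_neg_one_cons (by omega)]
    simp only [List.foldl_cons]
    have hget : PySem.List.pyGetD (ys ++ [c]) (ys.length : Int) ' ' = c := by
      rw [PySem.List.pyGetD_natCast]
      simp
    rw [hget]
    have hcong : ∀ i ∈ PySem.List.pyRange ((ys.length : Int) - 1) (-1) (-1),
        PySem.List.pyGetD (ys ++ [c]) i ' ' = PySem.List.pyGetD ys i ' ' := by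
      intro i hi
      rw [PySem.List.mem_pyRange_neg_one] at hi
      have h0 : 0 ≤ i := by omega
      have hlt : i.toNat < ys.length := by omega
      rw [PySem.List.pyGetD_eq_getElem (ys ++ [c]) ' ' h0 (by simp; omega),
          PySem.List.pyGetD_eq_getElem ys ' ' h0 (by omega)]
      exact List.getElem_append_left hlt
    calc (PySem.List.pyRange ((ys.length : Int) - 1) (-1) (-1)).foldl
          (fun answer i => answer ++ String.ofList [PySem.List.pyGetD (ys ++ [c]) i ' '])
          (s ++ String.ofList [c])
        = (PySem.List.pyRange ((ys.length : Int) - 1) (-1) (-1)).foldl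
          (fun answer i => answer ++ String.ofList [PySem.List.pyGetD ys i ' '])
          (s ++ String.ofList [c]) := by
          apply PySem.List.foldl_congr_mem
          intro acc x hx
          rw [hcong x hx]
      _ = s ++ String.ofList (ys ++ [c]).reverse := by
          rw [ihy]
          rw [String.append_assoc, ← String.ofList_append, List.reverse_append, List.reverse_singleton]

-- ===== VERDICT (by name: the statement is the Claim_ definition above) =====
theorem solution_spec : Claim_equal_solution := by
  intro n _
  unfold Spec_solution solution
  rw [loop_eq n.toNat n rfl []]
  simp only [List.nil_append]
  rw [revfold]
  rw [List.reverse_reverse, String.ofList_toList]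
  simp
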